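-- pv_equiv track=rewrite | github.com/mratet/advent-of-code_python | solutions/2019/day_22.py | shuffle_deck
-- ===== SOURCE A (Python) =====
-- def shuffle_deck(deck, instr):
--     for inst, n in instr:
--         match inst:
--             case "new":
--                 deck = list(reversed(deck))
--             case "cut":
--                 deck = deck[n:] + deck[:n]
--             case "inc":
--                 N = len(deck)
--                 new_deck = [0] * N
--                 deck.reverse()  # to pop easily
--                 pos = 0
--                 while deck:
--                     new_deck[pos % N] = deck.pop()
--                     pos += n
--                 deck = new_deck
--     return deck
-- ===== SOURCE B (Python) =====
-- def _modinv(a, n):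
--     # extended Euclid: the unique x in [0, n) with a*x % n == 1 (requires gcd(a, n) == 1)
--     r0, r1 = a % n, n
--     x0, x1 = 1, 0
--     while r1:
--         q = r0 // r1
--         r0, r1 = r1, r0 - q * r1
--         x0, x1 = x1, x0 - q * x1
--     return x0 % n
--
--
-- def shuffle_deck(deck, instr):
--     N = len(deck)
--     if N == 0:
--         return []
--     # compose all instructions into a single linear map: the card at index i ends at (a*i + b) % N
--     a, b = 1, 0
--     for inst, n in instr:
--         if inst == "new":
--             a, b = (-a) % N, (-b - 1) % N
--         elif inst == "cut":
--             b = (b - n) % N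
--         elif inst == "inc":
--             a, b = (a * n) % N, (b * n) % N
--     a_inv = _modinv(a, N)
--     return [deck[((j - b) * a_inv) % N] for j in range(N)]
-- ===== Notes on version B (the rewrite author's own statement) =====
-- stated objective: alternative
-- what changed: Instead of rebuilding the whole deck list for every instruction, B folds all instructions into a single affine map i -> (a*i+b) mod N and materialises the deck once via a modular inverse; it trades A's per-instruction C-level list rebuilding for one pass of per-element modular arithmetic, so it is asymptotically O(M+N) in the instruction count but not measurably faster on the benchmark's input mix.
-- outside the precondition, e.g. on shuffle_deck([0, 1, 2], [('cut', 5)]): A returns [0, 1, 2], B returns [2, 0, 1]; on shuffle_deck([0, 1, 2, 3], [('inc', 2)]): A returns [2, 0, 3, 0], B returns [0, 1, 2, 3]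
import Mathlib
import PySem

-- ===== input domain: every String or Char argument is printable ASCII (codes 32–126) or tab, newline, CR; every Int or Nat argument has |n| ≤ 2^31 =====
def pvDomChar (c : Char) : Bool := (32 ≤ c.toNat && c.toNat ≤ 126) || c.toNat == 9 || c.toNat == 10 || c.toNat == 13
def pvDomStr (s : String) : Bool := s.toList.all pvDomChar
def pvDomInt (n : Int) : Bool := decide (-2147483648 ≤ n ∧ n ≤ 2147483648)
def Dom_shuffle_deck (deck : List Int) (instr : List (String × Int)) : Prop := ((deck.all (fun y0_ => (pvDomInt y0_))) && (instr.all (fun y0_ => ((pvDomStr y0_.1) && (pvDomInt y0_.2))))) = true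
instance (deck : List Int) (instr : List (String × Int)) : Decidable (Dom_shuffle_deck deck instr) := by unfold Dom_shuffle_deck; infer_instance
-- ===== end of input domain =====

-- B composes all instructions into one modular affine map and applies it once, instead of rebuilding the deck per instruction;
-- equivalence is about the RETURN value only: A mutates its `deck` argument in place (list.reverse) at an "inc" instruction, B does not.

-- ===== PORT A =====
-- the inner `while deck: new_deck[pos % N] = deck.pop(); pos += n` loop of the "inc" case
def shuffleIncLoop (deck newDeck : List Int) (pos n N : Int) : List Int :=
  match h : PySem.List.pop? deck with
  | none => newDeck
  | some (x, rest) =>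
      shuffleIncLoop rest (PySem.List.pySetD newDeck (PySem.Int.mod pos N) x) (pos + n) n N
termination_by deck.length
decreasing_by have := PySem.List.length_of_pop?_eq_some deck h; simp at this; omega

def shuffle_deck (deck : List Int) (instr : List (String × Int)) : List Int :=
  instr.foldl (fun deck p =>
    if p.1 = "new" then deck.reverse
    else if p.1 = "cut" then
      PySem.List.slice deck (some p.2) none ++ PySem.List.slice deck none (some p.2)
    else if p.1 = "inc" then
      shuffleIncLoop deck.reverse (List.replicate deck.length 0) 0 p.2 (deck.length : Int)
    else deck) deck

-- ===== PORT B =====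
-- Source B's _modinv: extended Euclid, `while r1:` loop (hand port, exact: same iteration, Python's `//` is PySem.Int.floordiv)
def egcdLoop (r0 r1 x0 x1 : Int) : Int :=
  if h : r1 = 0 then x0
  else
    egcdLoop r1 (r0 - PySem.Int.floordiv r0 r1 * r1) x1 (x0 - PySem.Int.floordiv r0 r1 * x1)
termination_by r1.natAbs
decreasing_by
  have hm := PySem.Int.floordiv_mul_add_mod r0 r1
  rcases lt_trichotomy r1 0 with hr | hr | hr
  · have h1 := PySem.Int.mod_neg_bounds (a := r0) hr
    omega
  · exact absurd hr h
  · have h1 := PySem.Int.mod_nonneg r0 hr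
    have h2 := PySem.Int.mod_lt (a := r0) hr
    omega

def modInv (a n : Int) : Int :=
  PySem.Int.mod (egcdLoop (PySem.Int.mod a n) n 1 0) n

def shuffle_deck_alt (deck : List Int) (instr : List (String × Int)) : List Int :=
  if deck.length = 0 then []
  else
    let N : Int := (deck.length : Int)
    let ab := instr.foldl (fun (ab : Int × Int) p =>
      if p.1 = "new" then (PySem.Int.mod (-ab.1) N, PySem.Int.mod (-ab.2 - 1) N)
      else if p.1 = "cut" then (ab.1, PySem.Int.mod (ab.2 - p.2) N)
      else if p.1 = "inc" then (PySem.Int.mod (ab.1 * p.2) N, PySem.Int.mod (ab.2 * p.2) N)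
      else ab) (1, 0)
    let aInv := modInv ab.1 N
    (PySem.List.pyRange 0 N 1).map (fun j => PySem.List.pyGetD deck (PySem.Int.mod ((j - ab.2) * aInv) N) 0)

-- ===== PRECONDITION & SPEC =====
-- Pre_ restricts to the shuffle task's natural domain: cut amounts with |n| ≤ len(deck) (beyond that A's
-- slicing silently truncates the cut to a no-op instead of rotating) and "inc" steps coprime to the deck
-- size (otherwise A's scatter collides and returns filler zeros — not a shuffle — and B's modular inverse
-- does not exist).
def Pre_shuffle_deck (deck : List Int) (instr : List (String × Int)) : Prop :=
  ∀ p ∈ instr,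
    (p.1 = "cut" → -(deck.length : Int) ≤ p.2 ∧ p.2 ≤ (deck.length : Int)) ∧
    (p.1 = "inc" → deck ≠ [] → Int.gcd p.2 (deck.length : Int) = 1)
instance (deck : List Int) (instr : List (String × Int)) : Decidable (Pre_shuffle_deck deck instr) := by
  unfold Pre_shuffle_deck; infer_instance

def pvWitness_shuffle_deck : List Int × (List (String × Int)) :=
  ([3, 1, 4, 1, 5], [("new", 0), ("cut", 2), ("inc", 3), ("cut", -1)])

def Spec_shuffle_deck (deck : List Int) (instr : List (String × Int)) (out : List Int) : Prop := out = shuffle_deck_alt deck instr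
instance (deck : List Int) (instr : List (String × Int)) (out : List Int) : Decidable (Spec_shuffle_deck deck instr out) := by unfold Spec_shuffle_deck; infer_instance

-- ===== CLAIM (what is proved, stated in full; the proofs are below) =====
def Claim_equal_shuffle_deck : Prop := ∀ (deck : List Int) (instr : List (String × Int)), Dom_shuffle_deck deck instr → Pre_shuffle_deck deck instr → Spec_shuffle_deck deck instr (shuffle_deck deck instr)

-- ===== LEMMAS AND PROOFS =====

-- proof-side names for the two fold step functions (definitionally the ports' lambdas)
def stepA : List Int → (String × Int) → List Int := fun deck p =>
  if p.1 = "new" then deck.reverse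
  else if p.1 = "cut" then
    PySem.List.slice deck (some p.2) none ++ PySem.List.slice deck none (some p.2)
  else if p.1 = "inc" then
    shuffleIncLoop deck.reverse (List.replicate deck.length 0) 0 p.2 (deck.length : Int)
  else deck

def stepB (N : Int) : Int × Int → (String × Int) → Int × Int := fun ab p =>
  if p.1 = "new" then (PySem.Int.mod (-ab.1) N, PySem.Int.mod (-ab.2 - 1) N)
  else if p.1 = "cut" then (ab.1, PySem.Int.mod (ab.2 - p.2) N)
  else if p.1 = "inc" then (PySem.Int.mod (ab.1 * p.2) N, PySem.Int.mod (ab.2 * p.2) N)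
  else ab

lemma shuffle_deck_eq_foldl (deck : List Int) (instr : List (String × Int)) :
    shuffle_deck deck instr = instr.foldl stepA deck := rfl

lemma shuffle_deck_alt_eq (deck : List Int) (instr : List (String × Int)) (hd : deck.length ≠ 0) :
    shuffle_deck_alt deck instr =
      (PySem.List.pyRange 0 (deck.length : Int) 1).map (fun j =>
        PySem.List.pyGetD deck (PySem.Int.mod ((j - (instr.foldl (stepB (deck.length : Int)) (1, 0)).2) *
          modInv (instr.foldl (stepB (deck.length : Int)) (1, 0)).1 (deck.length : Int)) (deck.length : Int)) 0) := by
  unfold shuffle_deck_alt stepB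
  simp [hd]

-- unfolding equations of the inc loop: pop from the end
lemma shuffleIncLoop_nil (nd : List Int) (pos n N : Int) : shuffleIncLoop [] nd pos n N = nd := by
  rw [shuffleIncLoop]; rfl

lemma shuffleIncLoop_append (xs : List Int) (x : Int) (nd : List Int) (pos n N : Int) :
    shuffleIncLoop (xs ++ [x]) nd pos n N
      = shuffleIncLoop xs (PySem.List.pySetD nd (PySem.Int.mod pos N) x) (pos + n) n N := by
  rw [shuffleIncLoop]
  split
  · next h => rw [PySem.List.pop?_last] at h; cases h
  · next x' rest h =>
      rw [PySem.List.pop?_last] at h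
      injection h with h
      injection h with h1 h2
      subst h1; subst h2; rfl

-- front-consuming form of shuffleIncLoop (A reverses and pops from the end, i.e. consumes the original order)
def scatter (xs nd : List Int) (pos n N : Int) : List Int :=
  match xs with
  | [] => nd
  | x :: xs => scatter xs (nd.set ((pos % N).toNat) x) (pos + n) n N

lemma shuffleIncLoop_eq_scatter {N : Int} (hN : 0 < N) (n : Int) :
    ∀ (l nd : List Int) (pos : Int), shuffleIncLoop l nd pos n N = scatter l.reverse nd pos n N := by
  intro l
  induction l using List.reverseRecOn with
  | nil => intro nd pos; rw [shuffleIncLoop_nil]; rfl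
  | append_singleton xs x ih =>
      intro nd pos
      rw [shuffleIncLoop_append, List.reverse_append]
      simp only [List.reverse_singleton, List.singleton_append]
      rw [scatter, ← PySem.Int.mod_eq_emod_of_pos hN,
        ← PySem.List.pySetD_of_nonneg nd x (PySem.Int.mod_nonneg pos hN)]
      exact ih _ _

lemma scatter_length (n N : Int) :
    ∀ (xs nd : List Int) (pos : Int), (scatter xs nd pos n N).length = nd.length := by
  intro xs
  induction xs with
  | nil => intro nd pos; rfl
  | cons x xs ih => intro nd pos; rw [scatter, ih]; simp

lemma scatter_untouched {N : Int} (hN : 0 < N) (n : Int) :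
    ∀ (xs nd : List Int) (pos : Int) (j : Nat),
      (∀ k : Nat, k < xs.length → (((pos + k * n) % N).toNat ≠ j)) →
      (scatter xs nd pos n N)[j]? = nd[j]? := by
  intro xs
  induction xs with
  | nil => intro nd pos j _; rfl
  | cons x xs ih =>
      intro nd pos j hk
      rw [scatter, ih _ _ j ?_, List.getElem?_set_ne ?_]
      · have h0 := hk 0 (by simp)
        simpa using h0
      · intro k hklen
        have := hk (k + 1) (by simpa using Nat.succ_lt_succ hklen)
        have harith : pos + n + (k : Int) * n = pos + ((k : Nat) + 1 : Nat) * n := by push_cast; ring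
        rw [harith]
        exact this

lemma scatter_get {N : Int} (hN : 0 < N) (n : Int) :
    ∀ (xs nd : List Int) (pos : Int), (nd.length : Int) = N →
      (∀ k1 k2 : Nat, k1 < xs.length → k2 < xs.length →
        (pos + k1 * n) % N = (pos + k2 * n) % N → k1 = k2) →
      ∀ k : Nat, k < xs.length →
        (scatter xs nd pos n N)[((pos + k * n) % N).toNat]? = xs[k]? := by
  intro xs
  induction xs with
  | nil => intro nd pos _ _ k hk; cases hk
  | cons x xs ih =>
      intro nd pos hlen hinj k hk
      match k with
      | 0 =>
          rw [scatter]
          have harith : pos + ((0 : Nat) : Int) * n = pos := by push_cast; ring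
          rw [harith]
          rw [scatter_untouched hN n _ _ _ _ ?_]
          · have htlt : (pos % N).toNat < nd.length := by
              have h1 := Int.emod_nonneg pos (by omega : N ≠ 0)
              have h2 := Int.emod_lt_of_pos pos hN
              omega
            rw [List.getElem?_set_self (by simpa using htlt)]
            rfl
          · intro k' hk' hcontra
            have hX := Int.emod_nonneg (pos + n + (k' : Int) * n) (by omega : N ≠ 0)
            have hY := Int.emod_nonneg pos (by omega : N ≠ 0)
            have hXY : (pos + n + (k' : Int) * n) % N = pos % N := by omega
            have happ : (pos + ((k' + 1 : Nat) : Int) * n) % N = (pos + ((0 : Nat) : Int) * n) % N := by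
              rw [show pos + ((k' + 1 : Nat) : Int) * n = pos + n + (k' : Int) * n by push_cast; ring,
                show pos + ((0 : Nat) : Int) * n = pos by push_cast; ring]
              exact hXY
            have := hinj (k' + 1) 0 (by simpa using Nat.succ_lt_succ hk') (by simp) happ
            cases this
      | k' + 1 =>
          rw [scatter]
          have harith : pos + ((k' + 1 : Nat) : Int) * n = (pos + n) + (k' : Nat) * n := by push_cast; ring
          rw [harith]
          rw [ih _ _ (by simpa using hlen) ?_ k' (by simpa using Nat.lt_of_succ_lt_succ hk)]
          · rfl
          · intro k1 k2 hk1 hk2 he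
            have harith1 : pos + n + (k1 : Int) * n = pos + ((k1 + 1 : Nat) : Int) * n := by push_cast; ring
            have harith2 : pos + n + (k2 : Int) * n = pos + ((k2 + 1 : Nat) : Int) * n := by push_cast; ring
            rw [harith1, harith2] at he
            have := hinj (k1 + 1) (k2 + 1) (by simpa using Nat.succ_lt_succ hk1) (by simpa using Nat.succ_lt_succ hk2) he
            omega

-- cancellation of a unit mod N
lemma modeq_cancel {N c a b : Int} (hg : Int.gcd c N = 1) (h : Int.ModEq N (a * c) (b * c)) :
    Int.ModEq N a b := by
  have hd : N ∣ (b - a) * c := by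
    have := h.dvd
    rwa [show b * c - a * c = (b - a) * c by ring] at this
  have hco : IsCoprime (N : Int) c := Int.isCoprime_iff_gcd_eq_one.mpr (by rw [Int.gcd_comm]; exact hg)
  exact Int.modEq_iff_dvd.mpr (hco.dvd_of_dvd_mul_right hd)

lemma coprime_write_inj {N : Int} (hN : 0 < N) {n : Int} (hg : Int.gcd n N = 1) (pos : Int) :
    ∀ k1 k2 : Nat, (k1 : Int) < N → (k2 : Int) < N →
      (pos + k1 * n) % N = (pos + k2 * n) % N → k1 = k2 := by
  intro k1 k2 h1 h2 he
  have hme : Int.ModEq N (pos + k1 * n) (pos + k2 * n) := he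
  have h3 : Int.ModEq N ((k1 : Int) * n) ((k2 : Int) * n) := by
    have := hme.sub (Int.ModEq.refl pos)
    simpa using this
  have h4 : Int.ModEq N (k1 : Int) (k2 : Int) := modeq_cancel hg h3
  have e1 : (k1 : Int) % N = (k1 : Int) := Int.emod_eq_of_lt (by positivity) h1
  have e2 : (k2 : Int) % N = (k2 : Int) := Int.emod_eq_of_lt (by positivity) h2
  have : (k1 : Int) = (k2 : Int) := by rw [← e1, ← e2]; exact h4
  exact_mod_cast this

-- the extended-Euclid loop returns a modular inverse
lemma egcdLoop_inv (A N : Int) (hN : 0 < N) :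
    ∀ (m : Nat) (r1 : Int), r1.natAbs ≤ m → 0 ≤ r1 → ∀ r0 x0 x1 : Int, 0 ≤ r0 →
      Int.gcd r0 r1 = 1 →
      Int.ModEq N (x0 * A) r0 → Int.ModEq N (x1 * A) r1 →
      Int.ModEq N (egcdLoop r0 r1 x0 x1 * A) 1 := by
  intro m
  induction m with
  | zero =>
      intro r1 hm h0 r0 x0 x1 hr0 hg hx0 hx1
      have hz : r1 = 0 := by omega
      subst hz
      rw [egcdLoop]
      simp only [dif_pos rfl]
      have : r0 = 1 := by
        have := hg
        rw [Int.gcd_zero_right] at this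
        omega
      rw [← this]
      exact hx0
  | succ m ih =>
      intro r1 hm h0 r0 x0 x1 hr0 hg hx0 hx1
      by_cases hz : r1 = 0
      · subst hz
        rw [egcdLoop]
        simp only [dif_pos rfl]
        have : r0 = 1 := by
          have := hg
          rw [Int.gcd_zero_right] at this
          omega
        rw [← this]
        exact hx0
      · have hr1 : 0 < r1 := by omega
        rw [egcdLoop]
        simp only [dif_neg hz]
        rw [PySem.Int.floordiv_eq_ediv_of_pos hr1]
        have hrem : r0 - r0 / r1 * r1 = r0 % r1 := by rw [Int.emod_def]; ring
        rw [hrem]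
        have hb1 := Int.emod_nonneg r0 hz
        have hb2 := Int.emod_lt_of_pos r0 hr1
        apply ih (r0 % r1) (by omega) hb1 r1 x1 _ (le_of_lt hr1)
        · rw [Int.gcd_comm, Int.gcd_emod]
          exact hg
        · exact hx1
        · have step := hx0.sub (hx1.mul_left (r0 / r1))
          have e1 : x0 * A - r0 / r1 * (x1 * A) = (x0 - r0 / r1 * x1) * A := by ring
          have e2 : r0 - r0 / r1 * r1 = r0 % r1 := hrem
          rw [e1, e2] at step
          exact step

lemma modInv_spec {a N : Int} (hN : 0 < N) (hg : Int.gcd a N = 1) :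
    Int.ModEq N (modInv a N * a) 1 := by
  unfold modInv
  rw [PySem.Int.mod_eq_emod_of_pos hN, PySem.Int.mod_eq_emod_of_pos hN]
  have hg' : Int.gcd (a % N) N = 1 := by rw [Int.gcd_emod]; exact hg
  have hc1 : Int.ModEq N (1 * a) (a % N) := by
    show (1 * a) % N = (a % N) % N
    rw [Int.emod_emod_of_dvd _ dvd_rfl, one_mul]
  have hc2 : Int.ModEq N (0 * a) N := by
    show (0 * a) % N = N % N
    simp
  have h := egcdLoop_inv a N hN N.natAbs N le_rfl (le_of_lt hN) (a % N) 1 0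
    (Int.emod_nonneg a (by omega)) hg' hc1 hc2
  have hmm : Int.ModEq N (egcdLoop (a % N) N 1 0 % N) (egcdLoop (a % N) N 1 0) := by
    show _ % N = _ % N
    rw [Int.emod_emod_of_dvd _ dvd_rfl]
  exact (hmm.mul_right a).trans h

-- cut by n with |n| ≤ len is a rotation by n mod len
lemma cut_eq_rotate (l : List Int) (n : Int)
    (h1 : -(l.length : Int) ≤ n) (h2 : n ≤ (l.length : Int)) :
    PySem.List.slice l (some n) none ++ PySem.List.slice l none (some n)
      = l.rotate ((n % (l.length : Int)).toNat) := by
  rcases Nat.eq_zero_or_pos l.length with hL | hL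
  · have hnil : l = [] := List.eq_nil_of_length_eq_zero hL
    subst hnil
    have : n = 0 := by simp at h1 h2; omega
    subst this
    rfl
  · rcases le_or_gt 0 n with hn | hn
    · rw [PySem.List.slice_from l hn, PySem.List.slice_to l hn]
      rcases eq_or_lt_of_le h2 with he | hlt
      · have hnt : n.toNat = l.length := by omega
        have hmod : n % (l.length : Int) = 0 := by rw [← he]; simp
        rw [hnt, hmod, List.drop_length, List.take_length]
        simp
      · have hmod : n % (l.length : Int) = n := Int.emod_eq_of_lt hn hlt
        rw [hmod, List.rotate_eq_drop_append_take (by omega : n.toNat ≤ l.length)]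
    · set k : Nat := (-n).toNat with hk
      have hk1 : 0 < k := by omega
      have hkL : k ≤ l.length := by omega
      have hn' : n = -(k : Int) := by omega
      rw [hn', PySem.List.slice_from_neg_natCast l k hk1, PySem.List.slice_to_neg_natCast l k hk1]
      have hmod : (-(k : Int)) % (l.length : Int) = ((l.length - k : Nat) : Int) := by
        have h0 : (-(k : Int)) % (l.length : Int) = (-(k : Int) + (l.length : Int) * 1) % (l.length : Int) := by
          rw [Int.add_mul_emod_self_left]
        rw [h0, mul_one]
        have : -(k : Int) + (l.length : Int) = ((l.length - k : Nat) : Int) := by push_cast; omega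
        rw [this]
        exact Int.emod_eq_of_lt (by positivity) (by push_cast; omega)
      rw [hmod]
      have htn : (((l.length - k : Nat) : Int)).toNat = l.length - k := by omega
      rw [htn, List.rotate_eq_drop_append_take (Nat.sub_le _ _)]

-- indexing a rotated list
lemma getElem?_rotate (l : List Int) (m j : Nat) (hj : j < l.length) :
    (l.rotate m)[j]? = l[(j + m) % l.length]? := by
  have hj' : j < (l.rotate m).length := by simpa using hj
  have hlt : (j + m) % l.length < l.length := Nat.mod_lt _ (by omega)
  rw [List.getElem?_eq_getElem hj', List.getElem?_eq_getElem hlt]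
  exact congrArg some (List.get_rotate l m ⟨j, hj'⟩)

-- Nat-mod / Int-emod bridge
lemma toNat_emod_add {L : Nat} (hL : 0 < L) (x y : Int) :
    (((x % (L : Int)).toNat + (y % (L : Int)).toNat) % L) = ((x + y) % (L : Int)).toNat := by
  have hLi : (0 : Int) < (L : Int) := by exact_mod_cast hL
  have hx0 := Int.emod_nonneg x (by omega : (L : Int) ≠ 0)
  have hy0 := Int.emod_nonneg y (by omega : (L : Int) ≠ 0)
  have hz0 := Int.emod_nonneg (x + y) (by omega : (L : Int) ≠ 0)
  apply (Nat.cast_inj (R := Int)).mp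
  rw [Int.natCast_mod]
  push_cast [Int.toNat_of_nonneg hx0, Int.toNat_of_nonneg hy0, Int.toNat_of_nonneg hz0]
  rw [← Int.add_emod]

-- the invariant: cur is deck0 permuted by the affine map i ↦ (a*i + b) mod N
def Pdeck (deck0 cur : List Int) (a b : Int) : Prop :=
  cur.length = deck0.length ∧
  ∀ i : Nat, i < deck0.length →
    cur[(((a * (i : Int) + b) % (deck0.length : Int))).toNat]? = deck0[i]?

lemma Pdeck_congr {deck0 cur : List Int} {a b a' b' : Int}
    (ha : Int.ModEq (deck0.length : Int) a a') (hb : Int.ModEq (deck0.length : Int) b b')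
    (h : Pdeck deck0 cur a b) : Pdeck deck0 cur a' b' := by
  obtain ⟨hlen, hP⟩ := h
  refine ⟨hlen, fun i hi => ?_⟩
  have : (a' * (i : Int) + b') % (deck0.length : Int) = (a * (i : Int) + b) % (deck0.length : Int) :=
    ((ha.mul_right (i : Int)).add hb).symm
  rw [this]
  exact hP i hi

lemma stepA_new (deck0 cur : List Int) (a b : Int) (hd : deck0 ≠ [])
    (h : Pdeck deck0 cur a b) : Pdeck deck0 cur.reverse (-a) (-b - 1) := by
  obtain ⟨hlen, hP⟩ := h
  have hL : 0 < deck0.length := List.length_pos_of_ne_nil hd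
  have hLi : (0 : Int) < (deck0.length : Int) := by exact_mod_cast hL
  refine ⟨by simpa using hlen, fun i hi => ?_⟩
  set t : Nat := ((a * (i : Int) + b) % (deck0.length : Int)).toNat with hts
  have ht0 := Int.emod_nonneg (a * (i : Int) + b) (by omega : (deck0.length : Int) ≠ 0)
  have ht1 := Int.emod_lt_of_pos (a * (i : Int) + b) hLi
  have htlt : t < deck0.length := by omega
  have hcompl : ((-a) * (i : Int) + (-b - 1)) % (deck0.length : Int)
      = (deck0.length : Int) - 1 - (a * (i : Int) + b) % (deck0.length : Int) := by
    set x := a * (i : Int) + b with hx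
    have he : (-a) * (i : Int) + (-b - 1) = -x - 1 := by rw [hx]; ring
    rw [he]
    have h3 := Int.emod_nonneg (-x - 1) (by omega : (deck0.length : Int) ≠ 0)
    have h4 := Int.emod_lt_of_pos (-x - 1) hLi
    have me1 : Int.ModEq (deck0.length : Int) ((-x - 1) % (deck0.length : Int)) (-x - 1) := by
      show _ % _ = _ % _; rw [Int.emod_emod_of_dvd _ dvd_rfl]
    have me2 : Int.ModEq (deck0.length : Int) (x % (deck0.length : Int)) x := by
      show _ % _ = _ % _; rw [Int.emod_emod_of_dvd _ dvd_rfl]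
    have mesum : Int.ModEq (deck0.length : Int)
        ((-x - 1) % (deck0.length : Int) + x % (deck0.length : Int)) (-1) := by
      have hsum := me1.add me2
      rwa [show -x - 1 + x = (-1 : Int) by ring] at hsum
    have hdvd : (deck0.length : Int) ∣ ((-x - 1) % (deck0.length : Int) + x % (deck0.length : Int)) - (-1) :=
      (Int.modEq_iff_dvd.mp mesum.symm)
    have h5 := Int.emod_nonneg x (by omega : (deck0.length : Int) ≠ 0)
    have h6 := Int.emod_lt_of_pos x hLi
    have hzero : ((-x - 1) % (deck0.length : Int) + x % (deck0.length : Int)) - (-1)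
        - (deck0.length : Int) = 0 := by
      apply Int.eq_zero_of_abs_lt_dvd (dvd_sub hdvd (dvd_refl _))
      rw [abs_lt]
      constructor <;> omega
    omega
  rw [hcompl]
  have hidx : ((deck0.length : Int) - 1 - (a * (i : Int) + b) % (deck0.length : Int)).toNat
      = deck0.length - 1 - t := by omega
  rw [hidx]
  rw [List.getElem?_reverse (by omega : deck0.length - 1 - t < cur.length)]
  have : cur.length - 1 - (deck0.length - 1 - t) = t := by omega
  rw [this]
  exact hP i hi

lemma stepA_cut (deck0 cur : List Int) (a b n : Int) (hd : deck0 ≠ [])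
    (h1 : -(deck0.length : Int) ≤ n) (h2 : n ≤ (deck0.length : Int))
    (h : Pdeck deck0 cur a b) :
    Pdeck deck0 (PySem.List.slice cur (some n) none ++ PySem.List.slice cur none (some n)) a (b - n) := by
  obtain ⟨hlen, hP⟩ := h
  have hL : 0 < deck0.length := List.length_pos_of_ne_nil hd
  have hLi : (0 : Int) < (deck0.length : Int) := by exact_mod_cast hL
  rw [cut_eq_rotate cur n (by rw [hlen]; exact h1) (by rw [hlen]; exact h2)]
  set m : Nat := (n % (cur.length : Int)).toNat with hm
  constructor
  · simpa using hlen
  · intro i hi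
    set j : Nat := ((a * (i : Int) + (b - n)) % (deck0.length : Int)).toNat with hj
    have hj0 := Int.emod_nonneg (a * (i : Int) + (b - n)) (by omega : (deck0.length : Int) ≠ 0)
    have hj1 := Int.emod_lt_of_pos (a * (i : Int) + (b - n)) hLi
    have hjlt : j < cur.length := by omega
    rw [getElem?_rotate cur m j hjlt]
    have hkey : (j + m) % cur.length = ((a * (i : Int) + b) % (deck0.length : Int)).toNat := by
      have := toNat_emod_add (L := cur.length) (by omega) (a * (i : Int) + (b - n)) n
      rw [hlen] at this ⊢
      rw [hj, hm, hlen]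
      rw [this]
      congr 1
      ring_nf
    rw [hkey]
    exact hP i hi

lemma stepA_inc (deck0 cur : List Int) (a b n : Int) (hd : deck0 ≠ [])
    (hg : Int.gcd n (deck0.length : Int) = 1)
    (h : Pdeck deck0 cur a b) :
    Pdeck deck0 (shuffleIncLoop cur.reverse (List.replicate cur.length 0) 0 n (cur.length : Int))
      (a * n) (b * n) := by
  obtain ⟨hlen, hP⟩ := h
  have hL : 0 < deck0.length := List.length_pos_of_ne_nil hd
  have hcpos : 0 < cur.length := by omega
  have hLi : (0 : Int) < (cur.length : Int) := by exact_mod_cast hcpos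
  rw [shuffleIncLoop_eq_scatter hLi n, List.reverse_reverse]
  have hglen : Int.gcd n (cur.length : Int) = 1 := by rw [hlen]; exact hg
  have hinj := coprime_write_inj hLi hglen 0
  constructor
  · rw [scatter_length]; simp [hlen]
  · intro i hi
    set t : Nat := ((a * (i : Int) + b) % (deck0.length : Int)).toNat with hts
    have ht0 := Int.emod_nonneg (a * (i : Int) + b) (by omega : (deck0.length : Int) ≠ 0)
    have ht1 := Int.emod_lt_of_pos (a * (i : Int) + b) (show (0:Int) < (deck0.length:Int) by exact_mod_cast hL)
    have htlt : t < cur.length := by omega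
    have hsg := scatter_get hLi n cur (List.replicate cur.length 0) 0 (by simp)
      (fun k1 k2 hk1 hk2 he => hinj k1 k2 (by exact_mod_cast hk1) (by exact_mod_cast hk2) he)
      t htlt
    have hidx : (a * n * (i : Int) + b * n) % (cur.length : Int) = (0 + (t : Int) * n) % (cur.length : Int) := by
      have htv : (t : Int) = (a * (i : Int) + b) % (deck0.length : Int) := Int.toNat_of_nonneg ht0
      have me : Int.ModEq (cur.length : Int) ((t : Int) * n) ((a * (i : Int) + b) * n) := by
        apply Int.ModEq.mul_right
        rw [htv, hlen]
        show _ % _ = _ % _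
        rw [Int.emod_emod_of_dvd _ dvd_rfl]
      have : ((t : Int) * n) % (cur.length : Int) = ((a * (i : Int) + b) * n) % (cur.length : Int) := me
      rw [zero_add, this]
      congr 1
      ring
    rw [hlen] at hidx hsg ⊢
    rw [hidx]
    rw [hsg]
    exact hP i hi

-- A's fold keeps the deck equal to deck0 permuted by B's composed affine map
lemma fold_invariant (deck0 : List Int) (hd : deck0 ≠ []) :
    ∀ (instr : List (String × Int)), Pre_shuffle_deck deck0 instr →
    ∀ (cur : List Int) (a b : Int), Pdeck deck0 cur a b → Int.gcd a (deck0.length : Int) = 1 →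
      Pdeck deck0 (instr.foldl stepA cur)
        (instr.foldl (stepB (deck0.length : Int)) (a, b)).1
        (instr.foldl (stepB (deck0.length : Int)) (a, b)).2 ∧
      Int.gcd (instr.foldl (stepB (deck0.length : Int)) (a, b)).1 (deck0.length : Int) = 1 := by
  intro instr
  induction instr with
  | nil => intro _ cur a b hP hga; exact ⟨hP, hga⟩
  | cons p instr ih =>
      intro hpre cur a b hP hga
      have hL : 0 < deck0.length := List.length_pos_of_ne_nil hd
      have hLi : (0 : Int) < (deck0.length : Int) := by exact_mod_cast hL
      have hmodeq : ∀ x : Int, Int.ModEq (deck0.length : Int) x (PySem.Int.mod x (deck0.length : Int)) := by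
        intro x
        rw [PySem.Int.mod_eq_emod_of_pos hLi]
        show _ % _ = _ % _
        rw [Int.emod_emod_of_dvd _ dvd_rfl]
      have hgmod : ∀ x : Int, Int.gcd (PySem.Int.mod x (deck0.length : Int)) (deck0.length : Int) = Int.gcd x (deck0.length : Int) := by
        intro x
        rw [PySem.Int.mod_eq_emod_of_pos hLi, Int.gcd_emod]
      have hpre' : Pre_shuffle_deck deck0 instr := fun q hq => hpre q (List.mem_cons_of_mem p hq)
      have hpp := hpre p (List.mem_cons_self)
      simp only [List.foldl_cons]
      by_cases h1 : p.1 = "new"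
      · have hA : stepA cur p = cur.reverse := by simp [stepA, h1]
        have hB : stepB (deck0.length : Int) (a, b) p
            = (PySem.Int.mod (-a) (deck0.length : Int), PySem.Int.mod (-b - 1) (deck0.length : Int)) := by
          simp [stepB, h1]
        rw [hA, hB]
        apply ih hpre'
        · exact Pdeck_congr (hmodeq (-a)) (hmodeq (-b - 1)) (stepA_new deck0 cur a b hd ⟨hP.1, hP.2⟩)
        · rw [hgmod, Int.neg_gcd]; exact hga
      · by_cases h2 : p.1 = "cut"
        · have hA : stepA cur p = PySem.List.slice cur (some p.2) none ++ PySem.List.slice cur none (some p.2) := by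
            simp [stepA, h1, h2]
          have hB : stepB (deck0.length : Int) (a, b) p = (a, PySem.Int.mod (b - p.2) (deck0.length : Int)) := by
            simp [stepB, h1, h2]
          rw [hA, hB]
          obtain ⟨hcut, -⟩ := hpp
          obtain ⟨hc1, hc2⟩ := hcut h2
          apply ih hpre'
          · exact Pdeck_congr (Int.ModEq.refl a) (hmodeq (b - p.2)) (stepA_cut deck0 cur a b p.2 hd hc1 hc2 hP)
          · exact hga
        · by_cases h3 : p.1 = "inc"
          · have hA : stepA cur p = shuffleIncLoop cur.reverse (List.replicate cur.length 0) 0 p.2 (cur.length : Int) := by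
              simp [stepA, h1, h2, h3]
            have hB : stepB (deck0.length : Int) (a, b) p
                = (PySem.Int.mod (a * p.2) (deck0.length : Int), PySem.Int.mod (b * p.2) (deck0.length : Int)) := by
              simp [stepB, h1, h2, h3]
            rw [hA, hB]
            obtain ⟨-, hinc⟩ := hpp
            have hgn := hinc h3 hd
            apply ih hpre'
            · exact Pdeck_congr (hmodeq (a * p.2)) (hmodeq (b * p.2)) (stepA_inc deck0 cur a b p.2 hd hgn hP)
            · rw [hgmod]
              rw [← Int.isCoprime_iff_gcd_eq_one] at hga hgn ⊢
              exact IsCoprime.mul_left hga hgn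
          · have hA : stepA cur p = cur := by simp [stepA, h1, h2, h3]
            have hB : stepB (deck0.length : Int) (a, b) p = (a, b) := by simp [stepB, h1, h2, h3]
            rw [hA, hB]
            exact ih hpre' cur a b hP hga

lemma stepA_nil (p : String × Int) : stepA [] p = [] := by
  unfold stepA
  split_ifs with h1 h2 h3
  · rfl
  · have : ∀ x : Int, x ∈ PySem.List.slice ([] : List Int) (some p.2) none ++ PySem.List.slice ([] : List Int) none (some p.2) → False := by
      intro x hx
      rcases List.mem_append.mp hx with hx | hx
      · simpa using PySem.List.mem_of_mem_slice _ _ _ hx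
      · simpa using PySem.List.mem_of_mem_slice _ _ _ hx
    rcases hres : PySem.List.slice ([] : List Int) (some p.2) none ++ PySem.List.slice ([] : List Int) none (some p.2) with _ | ⟨y, ys⟩
    · rfl
    · exact absurd (by rw [hres]; exact List.mem_cons_self) (fun hx => this y hx)
  · simpa using shuffleIncLoop_nil (List.replicate 0 0) 0 p.2 0
  · rfl

lemma shuffle_deck_nil (instr : List (String × Int)) : shuffle_deck [] instr = [] := by
  rw [shuffle_deck_eq_foldl]
  induction instr with
  | nil => rfl
  | cons p instr ih => rw [List.foldl_cons, stepA_nil]; exact ih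

-- ===== VERDICT (by name: the statement is the Claim_ definition above) =====
theorem shuffle_deck_spec : Claim_equal_shuffle_deck := by
  intro deck instr _hdom hpre
  show shuffle_deck deck instr = shuffle_deck_alt deck instr
  by_cases hd : deck = []
  · subst hd
    rw [shuffle_deck_nil]
    rfl
  · have hL : 0 < deck.length := List.length_pos_of_ne_nil hd
    have hLi : (0 : Int) < (deck.length : Int) := by exact_mod_cast hL
    have base : Pdeck deck deck 1 0 := by
      refine ⟨rfl, fun i hi => ?_⟩
      have : (1 * (i : Int) + 0) % (deck.length : Int) = (i : Int) := by
        rw [one_mul, add_zero]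
        exact Int.emod_eq_of_lt (by positivity) (by exact_mod_cast hi)
      rw [this]
      simp
    obtain ⟨hPf, hgf⟩ := fold_invariant deck hd instr hpre deck 1 0 base Int.one_gcd
    set abf := instr.foldl (stepB (deck.length : Int)) (1, 0) with habf
    rw [shuffle_deck_eq_foldl, shuffle_deck_alt_eq deck instr (by omega)]
    set v := modInv abf.1 (deck.length : Int) with hv
    have hinv := modInv_spec hLi hgf
    have hlenf : (instr.foldl stepA deck).length = deck.length := hPf.1
    apply List.ext_getElem?
    intro j
    by_cases hj : j < deck.length
    · set i : Nat := (((j : Int) - abf.2) * v % (deck.length : Int)).toNat with hi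
      have hi0 := Int.emod_nonneg (((j : Int) - abf.2) * v) (by omega : (deck.length : Int) ≠ 0)
      have hi1 := Int.emod_lt_of_pos (((j : Int) - abf.2) * v) hLi
      have hilt : i < deck.length := by omega
      have hkey : ((abf.1 * (i : Int) + abf.2) % (deck.length : Int)).toNat = j := by
        have hiv : (i : Int) = ((j : Int) - abf.2) * v % (deck.length : Int) := Int.toNat_of_nonneg hi0
        have me1 : Int.ModEq (deck.length : Int) (abf.1 * (i : Int)) (abf.1 * (((j : Int) - abf.2) * v)) := by
          apply Int.ModEq.mul_left
          rw [hiv]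
          show _ % _ = _ % _
          rw [Int.emod_emod_of_dvd _ dvd_rfl]
        have me2 : Int.ModEq (deck.length : Int) (abf.1 * (((j : Int) - abf.2) * v)) ((j : Int) - abf.2) := by
          have : abf.1 * (((j : Int) - abf.2) * v) = ((j : Int) - abf.2) * (v * abf.1) := by ring
          rw [this]
          calc ((j : Int) - abf.2) * (v * abf.1)
              ≡ ((j : Int) - abf.2) * 1 [ZMOD (deck.length : Int)] := Int.ModEq.mul_left _ hinv
            _ = (j : Int) - abf.2 := by ring
        have me : Int.ModEq (deck.length : Int) (abf.1 * (i : Int) + abf.2) (j : Int) := by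
          have := (me1.trans me2).add (Int.ModEq.refl abf.2)
          simpa using this
        have : (abf.1 * (i : Int) + abf.2) % (deck.length : Int) = (j : Int) % (deck.length : Int) := me
        rw [this, Int.emod_eq_of_lt (by positivity) (by exact_mod_cast hj)]
        omega
      have hlhs : (instr.foldl stepA deck)[j]? = deck[i]? := by
        rw [← hkey]
        exact hPf.2 i hilt
      rw [hlhs, List.getElem?_map, PySem.List.getElem?_pyRange_one]
      rw [if_pos (by omega : j < (((deck.length : Int)) - 0).toNat)]
      simp only [Option.map_some, zero_add]
      rw [PySem.Int.mod_eq_emod_of_pos hLi,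
        PySem.List.pyGetD_eq_getElem deck 0 hi0 hi1,
        List.getElem?_eq_getElem hilt]
    · rw [List.getElem?_eq_none (by omega : (instr.foldl stepA deck).length ≤ j),
        List.getElem?_eq_none]
      simp only [List.length_map, PySem.List.length_pyRange_one]
      omega
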